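-- pv_equiv track=rewrite | github.com/breuleux/fluogames | fluobot/format.py | blockify
-- ===== SOURCE A (Python) =====
-- def strip(message):
--     message = message.split('\n')
--     return '\n'.join(map(str.strip, message))
--
-- def blockify(message):
--     if not message:
--         return ""
--     rval = []
--     rval.append('')
--     for line in strip(message).split('\n'):
--         if not line:
--             if rval and rval[-1]:
--                 rval.append('')
--         else:
--             if rval[-1]:
--                 rval[-1] += ' ' + line
--             else:
--                 rval[-1] = line
--     return '\n'.join(rval).strip()
-- ===== SOURCE B (Python) =====
-- def blockify(message):
--     if not message:
--         return ""
--     paragraphs, current = [], []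
--     for line in message.split('\n'):
--         word = line.strip()
--         if word:
--             current.append(word)
--         elif current:
--             paragraphs.append(' '.join(current))
--             current = []
--     if current:
--         paragraphs.append(' '.join(current))
--     return '\n'.join(paragraphs)
-- ===== Notes on version B (the rewrite author's own statement) =====
-- stated objective: simpler
-- what changed: Replaces A's seeded-[''] running string accumulator (in-place += into the last slot plus a final join-and-strip) by a single pass that collects each paragraph's words in a list, joins each finished paragraph once, and joins the paragraphs at the end, so no sentinel entry and no trailing strip are needed.
import Mathlib
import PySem

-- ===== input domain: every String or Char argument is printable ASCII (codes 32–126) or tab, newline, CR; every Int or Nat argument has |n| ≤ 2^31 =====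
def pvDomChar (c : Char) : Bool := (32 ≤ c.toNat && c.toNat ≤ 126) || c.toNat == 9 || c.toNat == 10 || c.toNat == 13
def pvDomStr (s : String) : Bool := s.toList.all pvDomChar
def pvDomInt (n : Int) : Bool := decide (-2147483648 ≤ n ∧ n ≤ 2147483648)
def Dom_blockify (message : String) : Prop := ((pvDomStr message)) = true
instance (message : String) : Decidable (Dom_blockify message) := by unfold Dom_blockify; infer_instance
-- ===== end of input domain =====

-- B replaces A's seeded-[''] running string accumulator (in-place `+=` and a final `.strip()`)
-- by collecting each paragraph's words in a list and joining once per paragraph: simpler, no sentinel.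

-- ===== PORT A =====
-- helper `strip` of the Python module: split on '\n', strip each line, re-join with '\n'
def pyStrip (message : String) : String :=
  String.ofList
    (PySem.Chars.join ['\n'] ((PySem.Chars.splitOn message.toList ['\n']).map PySem.Chars.strip))

-- loop body of A; `(PySem.List.pyGet? rval (-1)).getD []` is Python's rval[-1]
-- (the `.getD []` default is never taken: rval starts as [''] and never becomes empty)
def blockifyStep (rval : List (List Char)) (line : List Char) : List (List Char) :=
  if line = [] then
    if rval ≠ [] ∧ (PySem.List.pyGet? rval (-1)).getD [] ≠ [] then rval ++ [[]] else rval
  else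
    if (PySem.List.pyGet? rval (-1)).getD [] ≠ [] then
      rval.dropLast ++ [(PySem.List.pyGet? rval (-1)).getD [] ++ (' ' :: line)]
    else
      rval.dropLast ++ [line]

def blockify (message : String) : String :=
  if message = "" then "" else
  let rval : List (List Char) :=
    (PySem.Chars.splitOn (pyStrip message).toList ['\n']).foldl blockifyStep [[]]
  String.ofList (PySem.Chars.strip (PySem.Chars.join ['\n'] rval))

-- ===== PORT B =====
-- loop body of B: state = (paragraphs, current words)
def altStep (st : List (List Char) × List (List Char)) (line : List Char) :
    List (List Char) × List (List Char) :=
  let word := PySem.Chars.strip line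
  if word ≠ [] then (st.1, st.2 ++ [word])
  else if st.2 ≠ [] then (st.1 ++ [PySem.Chars.join [' '] st.2], []) else st

def blockify_alt (message : String) : String :=
  if message = "" then "" else
  let st := (PySem.Chars.splitOn message.toList ['\n']).foldl altStep ([], [])
  let paragraphs := if st.2 ≠ [] then st.1 ++ [PySem.Chars.join [' '] st.2] else st.1
  String.ofList (PySem.Chars.join ['\n'] paragraphs)

-- ===== PRECONDITION & SPEC =====
def Spec_blockify (message : String) (out : String) : Prop := out = blockify_alt message
instance (message : String) (out : String) : Decidable (Spec_blockify message out) := by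
  unfold Spec_blockify; infer_instance

-- ===== CLAIM (what is proved, stated in full; the proofs are below) =====
def Claim_equal_blockify : Prop :=
  ∀ (message : String), Dom_blockify message → Spec_blockify message (blockify message)

-- ===== LEMMAS AND PROOFS =====

-- simple structural model of s.split('\n')
def sp : List Char → List (List Char)
  | [] => [[]]
  | c :: t => if c = '\n' then [] :: sp t else (c :: (sp t).headI) :: (sp t).tail

theorem sp_ne_nil (s : List Char) : sp s ≠ [] := by
  cases s with
  | nil => simp [sp]
  | cons c t => simp only [sp]; split <;> simp

theorem consHeadITail {α : Type} [Inhabited α] (l : List α) (h : l ≠ []) :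
    l.headI :: l.tail = l := by
  cases l with
  | nil => exact absurd rfl h
  | cons a t => rfl

theorem sp_cons_headI_tail (s : List Char) : (sp s).headI :: (sp s).tail = sp s :=
  consHeadITail _ (sp_ne_nil s)

theorem go_spec (l : List Char) : ∀ (fuel : Nat) (cur : List Char) (acc : List (List Char)),
    l.length ≤ fuel →
    PySem.Chars.splitOn.go ['\n'] fuel l cur acc
      = acc.reverse ++ (cur.reverse ++ (sp l).headI) :: (sp l).tail := by
  induction l with
  | nil =>
    intro fuel cur acc _
    cases fuel <;> simp [PySem.Chars.splitOn.go, sp]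
  | cons c rest ih =>
    intro fuel cur acc h
    cases fuel with
    | zero => simp at h
    | succ fuel =>
      by_cases hc : c = '\n'
      · subst hc
        rw [show PySem.Chars.splitOn.go ['\n'] (fuel+1) ('\n'::rest) cur acc
              = PySem.Chars.splitOn.go ['\n'] fuel rest [] (cur.reverse :: acc) by
            simp [PySem.Chars.splitOn.go, List.isPrefixOf]]
        rw [ih fuel [] (cur.reverse :: acc) (by simpa using h)]
        simp [sp, sp_cons_headI_tail]
      · rw [show PySem.Chars.splitOn.go ['\n'] (fuel+1) (c::rest) cur acc
              = PySem.Chars.splitOn.go ['\n'] fuel rest (c::cur) acc by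
            simp [PySem.Chars.splitOn.go, List.isPrefixOf, Ne.symm hc]]
        rw [ih fuel (c::cur) acc (by simpa using h)]
        simp [sp, hc]

theorem splitOn_nl (s : List Char) : PySem.Chars.splitOn s ['\n'] = sp s := by
  rw [PySem.Chars.splitOn, go_spec s (s.length + 1) [] [] (by omega)]
  simp [sp_cons_headI_tail]

theorem sp_no_nl (s : List Char) : ∀ p ∈ sp s, '\n' ∉ p := by
  induction s with
  | nil => simp [sp]
  | cons c t ih =>
    intro p hp
    simp only [sp] at hp
    split at hp
    · rcases List.mem_cons.mp hp with rfl | hp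
      · simp
      · exact ih p hp
    · next hc =>
      rcases List.mem_cons.mp hp with rfl | hp
      · simp only [List.mem_cons, not_or]
        refine ⟨fun h => hc h.symm, ih _ ?_⟩
        rw [← sp_cons_headI_tail t]
        exact List.mem_cons_self
      · exact ih p (List.tail_subset _ hp)

theorem sp_append_not_nl (p : List Char) (r : List Char) (hp : '\n' ∉ p) :
    sp (p ++ r) = (p ++ (sp r).headI) :: (sp r).tail := by
  induction p with
  | nil => simpa using (sp_cons_headI_tail r).symm
  | cons c p' ih =>
    simp only [List.mem_cons, not_or] at hp
    rw [List.cons_append, sp]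
    rw [if_neg (fun h => hp.1 h.symm), ih hp.2]
    simp

theorem sp_join (parts : List (List Char)) (hne : parts ≠ [])
    (hnl : ∀ p ∈ parts, '\n' ∉ p) :
    sp (PySem.Chars.join ['\n'] parts) = parts := by
  induction parts with
  | nil => exact absurd rfl hne
  | cons p ps ih =>
    cases ps with
    | nil =>
      have hj : PySem.Chars.join ['\n'] [p] = p := by simp [PySem.Chars.join, List.intercalate]
      rw [hj]
      have := sp_append_not_nl p [] (hnl p (by simp))
      simpa [sp] using this
    | cons q qs =>
      have hj : PySem.Chars.join ['\n'] (p :: q :: qs)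
          = p ++ '\n' :: PySem.Chars.join ['\n'] (q :: qs) := by
        simp [PySem.Chars.join, List.intercalate, List.intersperse]
      rw [hj, sp_append_not_nl p _ (hnl p (by simp))]
      have hrec : sp ('\n' :: PySem.Chars.join ['\n'] (q :: qs))
          = [] :: sp (PySem.Chars.join ['\n'] (q :: qs)) := by simp [sp]
      rw [hrec, ih (by simp) (fun x hx => hnl x (List.mem_cons_of_mem p hx))]
      simp

-- a word is "ok" when it neither starts nor ends with Python whitespace (trivial for [])
def okW (w : List Char) : Prop :=
  PySem.Chars.isspace w.headI = false ∧ PySem.Chars.isspace w.reverse.headI = false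

theorem headI_dropWhile_isspace (l : List Char) :
    PySem.Chars.isspace (l.dropWhile PySem.Chars.isspace).headI = false := by
  rcases h : l.dropWhile PySem.Chars.isspace with _ | ⟨c, t⟩
  · decide
  · have := List.head_dropWhile_not PySem.Chars.isspace (l := l) (by simp [h])
    simpa [h] using this

theorem okW_strip (l : List Char) : okW (PySem.Chars.strip l) := by
  have hrev : (PySem.Chars.strip l).reverse
      = (PySem.Chars.lstrip l).reverse.dropWhile PySem.Chars.isspace := by
    simp [PySem.Chars.strip, PySem.Chars.rstrip]
  constructor
  · -- head of strip l = head of lstrip l, which is non-space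
    rcases hsl : PySem.Chars.strip l with _ | ⟨c, t⟩
    · decide
    · have hpre : PySem.Chars.strip l <+: PySem.Chars.lstrip l := by
        have h0 := List.dropWhile_suffix (l := (PySem.Chars.lstrip l).reverse)
          (p := PySem.Chars.isspace)
        have h1 := h0.reverse
        rw [List.reverse_reverse] at h1
        rw [PySem.Chars.strip, PySem.Chars.rstrip]
        exact h1
      obtain ⟨tl, htl⟩ := hpre
      rw [hsl] at htl
      have h4 : PySem.Chars.isspace (PySem.Chars.lstrip l).headI = false := by
        simpa [PySem.Chars.lstrip] using headI_dropWhile_isspace l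
      rw [← htl] at h4
      simpa using h4
  · -- last of strip l = head of dropWhile isspace (lstrip l).reverse, non-space
    rw [hrev]
    exact headI_dropWhile_isspace _

theorem lstrip_eq_self (x : List Char) (h : PySem.Chars.isspace x.headI = false) :
    PySem.Chars.lstrip x = x := by
  cases x with
  | nil => rfl
  | cons c t => simp only [List.headI] at h; simp [PySem.Chars.lstrip, h]

theorem rstrip_eq_self (x : List Char) (h : PySem.Chars.isspace x.reverse.headI = false) :
    PySem.Chars.rstrip x = x := by
  rw [PySem.Chars.rstrip]
  rcases hx : x.reverse with _ | ⟨c, t⟩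
  · have := List.reverse_eq_nil_iff.mp hx
    simp [this]
  · rw [hx] at h
    simp only [List.headI] at h
    rw [List.dropWhile_cons, h]
    simp only [Bool.false_eq_true, if_false]
    rw [← hx, List.reverse_reverse]

theorem strip_eq_self (x : List Char) (h : okW x) : PySem.Chars.strip x = x := by
  rw [PySem.Chars.strip, lstrip_eq_self x h.1, rstrip_eq_self x h.2]

theorem strip_subset (l : List Char) : PySem.Chars.strip l ⊆ l := by
  intro a ha
  have h1 : PySem.Chars.strip l ⊆ PySem.Chars.lstrip l := by
    rw [PySem.Chars.strip, PySem.Chars.rstrip]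
    intro b hb
    have := (List.dropWhile_sublist (l := (PySem.Chars.lstrip l).reverse)
      (p := PySem.Chars.isspace)).subset (by simpa using hb)
    simpa using this
  have h2 : PySem.Chars.lstrip l ⊆ l :=
    (List.dropWhile_sublist (l := l) (p := PySem.Chars.isspace)).subset
  exact h2 (h1 ha)

-- intercalate spine facts
theorem join_cons₂ (sep p q : List Char) (ps : List (List Char)) :
    PySem.Chars.join sep (p :: q :: ps) = p ++ sep ++ PySem.Chars.join sep (q :: ps) := by
  simp [PySem.Chars.join, List.intercalate, List.intersperse]

theorem join_singleton' (sep p : List Char) : PySem.Chars.join sep [p] = p := by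
  simp [PySem.Chars.join, List.intercalate]

theorem join_append_singleton (sep q : List Char) :
    ∀ (ps : List (List Char)), ps ≠ [] →
    PySem.Chars.join sep (ps ++ [q]) = PySem.Chars.join sep ps ++ sep ++ q := by
  intro ps
  induction ps with
  | nil => intro h; exact absurd rfl h
  | cons p ps ih =>
    intro _
    cases ps with
    | nil => simp [join_cons₂]
    | cons r rs =>
      have h1 : (r :: rs) ++ [q] = r :: (rs ++ [q]) := by simp
      rw [List.cons_append, h1, join_cons₂ sep p r (rs ++ [q]), ← h1,
        ih (by simp), join_cons₂]
      simp

theorem join_headI (sep p : List Char) (ps : List (List Char)) (hp : p ≠ []) :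
    (PySem.Chars.join sep (p :: ps)).headI = p.headI := by
  cases ps with
  | nil => rw [join_singleton']
  | cons q qs =>
    rw [join_cons₂]
    rcases p with _ | ⟨c, t⟩
    · exact absurd rfl hp
    · simp

theorem join_ne_nil (sep p : List Char) (ps : List (List Char)) (hp : p ≠ []) :
    PySem.Chars.join sep (p :: ps) ≠ [] := by
  cases ps with
  | nil => rw [join_singleton']; exact hp
  | cons q qs =>
    rw [join_cons₂]
    rcases p with _ | ⟨c, t⟩
    · exact absurd rfl hp
    · simp

theorem join_reverse_headI (sep : List Char) :
    ∀ (ps : List (List Char)) (q : List Char), q ≠ [] →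
    (PySem.Chars.join sep (ps ++ [q])).reverse.headI = q.reverse.headI := by
  intro ps q hq
  cases ps with
  | nil =>
    rw [List.nil_append, join_singleton']
  | cons p pt =>
    rw [join_append_singleton sep q (p :: pt) (by simp)]
    rcases hqr : q.reverse with _ | ⟨c, t⟩
    · exact absurd (by simpa using hqr) hq
    · simp [hqr]

theorem okW_join (sep : List Char) (ps : List (List Char)) (hps : ps ≠ [])
    (h : ∀ p ∈ ps, p ≠ [] ∧ okW p) : okW (PySem.Chars.join sep ps) := by
  rcases ps with _ | ⟨p, pt⟩
  · exact absurd rfl hps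
  · constructor
    · rw [join_headI sep p pt (h p (by simp)).1]
      exact (h p (by simp)).2.1
    · have hlast : (p :: pt) ≠ [] := by simp
      rcases List.eq_nil_or_concat (p :: pt) with h' | ⟨front, q, hfq⟩
      · simp at h'
      · rw [List.concat_eq_append] at hfq
        rw [hfq, join_reverse_headI sep front q (h q (by rw [hfq]; simp)).1]
        exact (h q (by rw [hfq]; simp)).2.2

-- B's loop body, on the already-stripped word
def altStepW (st : List (List Char) × List (List Char)) (w : List Char) :
    List (List Char) × List (List Char) :=
  if w ≠ [] then (st.1, st.2 ++ [w])
  else if st.2 ≠ [] then (st.1 ++ [PySem.Chars.join [' '] st.2], []) else st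

theorem pyGet_last {α : Type} (xs : List α) (x : α) :
    PySem.List.pyGet? (xs ++ [x]) (-1) = some x := by
  simp [PySem.List.pyGet?, PySem.List.pyIdx?]

theorem joinSp_ne_nil (cur : List (List Char)) (hc : ∀ w ∈ cur, w ≠ [] ∧ okW w) :
    (PySem.Chars.join [' '] cur = [] ↔ cur = []) := by
  cases cur with
  | nil => simp [PySem.Chars.join, List.intercalate]
  | cons w ws =>
    have h1 : PySem.Chars.join [' '] (w :: ws) ≠ [] := join_ne_nil _ _ _ (hc w (by simp)).1
    simp [h1]

def StInv (st : List (List Char) × List (List Char)) : Prop :=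
  (∀ p ∈ st.1, p ≠ [] ∧ okW p) ∧ (∀ w ∈ st.2, w ≠ [] ∧ okW w)

theorem fold_corr : ∀ (ws : List (List Char)) (pars cur : List (List Char)),
    (∀ w ∈ ws, okW w) → StInv (pars, cur) →
    (List.foldl blockifyStep (pars ++ [PySem.Chars.join [' '] cur]) ws
      = (List.foldl altStepW (pars, cur) ws).1
        ++ [PySem.Chars.join [' '] (List.foldl altStepW (pars, cur) ws).2])
    ∧ StInv (List.foldl altStepW (pars, cur) ws) := by
  intro ws
  induction ws with
  | nil => intro pars cur _ hinv; exact ⟨rfl, hinv⟩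
  | cons w ws ih =>
    intro pars cur hws hinv
    have hok : okW w := hws w (by simp)
    have hws' : ∀ v ∈ ws, okW v := fun v hv => hws v (by simp [hv])
    have hlast := pyGet_last pars (PySem.Chars.join [' '] cur)
    by_cases hw : w = []
    · subst hw
      by_cases hcur : cur = []
      · subst hcur
        have hstep : blockifyStep (pars ++ [PySem.Chars.join [' '] []]) [] =
            pars ++ [PySem.Chars.join [' '] []] := by
          simp [blockifyStep, PySem.Chars.join, List.intercalate]
        have hstep' : altStepW (pars, ([] : List (List Char))) [] = (pars, []) := by
          simp [altStepW]
        rw [List.foldl_cons, List.foldl_cons, hstep, hstep']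
        exact ih pars [] hws' hinv
      · have hjne : PySem.Chars.join [' '] cur ≠ [] := by
          rw [ne_eq, joinSp_ne_nil cur hinv.2]; exact hcur
        have hstep : blockifyStep (pars ++ [PySem.Chars.join [' '] cur]) [] =
            (pars ++ [PySem.Chars.join [' '] cur]) ++ [PySem.Chars.join [' '] []] := by
          have hj : PySem.Chars.join [' '] ([] : List (List Char)) = [] := by
            simp [PySem.Chars.join, List.intercalate]
          rw [hj]
          simp only [blockifyStep, hlast, Option.getD_some]
          rw [if_pos trivial, if_pos ⟨by simp, hjne⟩]
        have hstep' : altStepW (pars, cur) [] =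
            (pars ++ [PySem.Chars.join [' '] cur], []) := by
          simp [altStepW, hcur]
        rw [List.foldl_cons, List.foldl_cons, hstep, hstep']
        refine ih _ [] hws' ⟨?_, by simp⟩
        intro p hp
        rcases List.mem_append.mp hp with h | h
        · exact hinv.1 p h
        · simp only [List.mem_singleton] at h
          subst h
          exact ⟨hjne, okW_join [' '] cur hcur hinv.2⟩
    · by_cases hcur : cur = []
      · subst hcur
        have hstep : blockifyStep (pars ++ [PySem.Chars.join [' '] []]) w =
            pars ++ [PySem.Chars.join [' '] [w]] := by
          simp [blockifyStep, hw, PySem.Chars.join, List.intercalate]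
        have hstep' : altStepW (pars, ([] : List (List Char))) w = (pars, [w]) := by
          simp [altStepW, hw]
        rw [List.foldl_cons, List.foldl_cons, hstep, hstep']
        refine ih pars [w] hws' ⟨hinv.1, ?_⟩
        intro v hv; simp only [List.mem_singleton] at hv; subst hv; exact ⟨hw, hok⟩
      · have hjne : PySem.Chars.join [' '] cur ≠ [] := by
          rw [ne_eq, joinSp_ne_nil cur hinv.2]; exact hcur
        have hjoin : PySem.Chars.join [' '] cur ++ (' ' :: w)
            = PySem.Chars.join [' '] (cur ++ [w]) := by
          rw [join_append_singleton [' '] w cur hcur]; simp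
        have hstep : blockifyStep (pars ++ [PySem.Chars.join [' '] cur]) w =
            pars ++ [PySem.Chars.join [' '] (cur ++ [w])] := by
          simp only [blockifyStep, if_neg hw, hlast, Option.getD_some, if_pos hjne,
            List.dropLast_concat, hjoin]
        have hstep' : altStepW (pars, cur) w = (pars, cur ++ [w]) := by
          simp [altStepW, hw]
        rw [List.foldl_cons, List.foldl_cons, hstep, hstep']
        refine ih pars (cur ++ [w]) hws' ⟨hinv.1, ?_⟩
        intro v hv
        rcases List.mem_append.mp hv with h | h
        · exact hinv.2 v h
        · simp only [List.mem_singleton] at h; subst h; exact ⟨hw, hok⟩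

-- ===== VERDICT (by name: the statement is the Claim_ definition above) =====
set_option maxHeartbeats 1000000 in
theorem blockify_spec : Claim_equal_blockify := by
  intro message _
  unfold Spec_blockify
  by_cases hmsg : message = ""
  · simp [blockify, blockify_alt, hmsg]
  · set L0 := PySem.Chars.splitOn message.toList ['\n'] with hL0
    set L := L0.map PySem.Chars.strip with hL
    clear_value L0
    have hLne : L ≠ [] := by
      rw [hL, hL0, splitOn_nl]
      simpa using sp_ne_nil message.toList
    have hLnl : ∀ p ∈ L, '\n' ∉ p := by
      intro p hp
      rw [hL] at hp
      rcases List.mem_map.mp hp with ⟨q, hq, rfl⟩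
      rw [hL0, splitOn_nl] at hq
      exact fun hmem => sp_no_nl message.toList q hq (strip_subset q hmem)
    have hLok : ∀ w ∈ L, okW w := by
      intro w hw
      rcases List.mem_map.mp hw with ⟨q, _, rfl⟩
      exact okW_strip q
    -- A's re-split of pyStrip gives exactly L
    have hresplit : PySem.Chars.splitOn (pyStrip message).toList ['\n'] = L := by
      rw [pyStrip]
      simp only [String.toList_ofList]
      rw [splitOn_nl, ← hL0, ← hL]
      exact sp_join L hLne hLnl
    -- relate the two folds
    obtain ⟨hfold, hinv⟩ := fold_corr L [] [] hLok ⟨by simp, by simp⟩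
    set st := List.foldl altStepW ([], []) L with hst
    clear_value st
    have hBfold : List.foldl altStep (([], []) : List (List Char) × List (List Char)) L0 = st := by
      rw [hst, hL, List.foldl_map]
      rfl
    rw [blockify, blockify_alt, if_neg hmsg, if_neg hmsg]
    dsimp only
    rw [hresplit, ← hL0]
    have hA : List.foldl blockifyStep [[]] L
        = st.1 ++ [PySem.Chars.join [' '] st.2] := by
      have : ([[]] : List (List Char)) = [] ++ [PySem.Chars.join [' '] []] := by
        simp [PySem.Chars.join, List.intercalate]
      rw [this]
      exact hfold
    rw [hA, hBfold]
    -- final joins agree after A's trailing strip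
    by_cases hcur : st.2 = []
    · rw [hcur]
      rw [if_neg (by simp : ¬(([] : List (List Char)) ≠ []))]
      have hj0 : PySem.Chars.join [' '] ([] : List (List Char)) = [] := by
        simp [PySem.Chars.join, List.intercalate]
      rw [hj0]
      rcases hp : st.1 with _ | ⟨p, pt⟩
      · simp [PySem.Chars.join, List.intercalate, PySem.Chars.strip,
          PySem.Chars.lstrip, PySem.Chars.rstrip]
      · have hok : okW (PySem.Chars.join ['\n'] (p :: pt)) := by
          apply okW_join _ _ (by simp)
          intro x hx; exact hinv.1 x (by rw [hp]; exact hx)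
        have hne : PySem.Chars.join ['\n'] (p :: pt) ≠ [] :=
          join_ne_nil _ _ _ (hinv.1 p (by rw [hp]; simp)).1
        rw [join_append_singleton ['\n'] [] (p :: pt) (by simp), List.append_nil]
        -- strip (x ++ ['\n']) = x  when x is ok and nonempty
        congr 1
        rw [PySem.Chars.strip]
        have hl : PySem.Chars.lstrip (PySem.Chars.join ['\n'] (p :: pt) ++ ['\n'])
            = PySem.Chars.join ['\n'] (p :: pt) ++ ['\n'] := by
          apply lstrip_eq_self
          rcases hx : PySem.Chars.join ['\n'] (p :: pt) with _ | ⟨c, t⟩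
          · exact absurd hx hne
          · have := hok.1; rw [hx] at this; simpa using this
        rw [hl, PySem.Chars.rstrip, List.reverse_append]
        simp only [List.reverse_cons, List.reverse_nil, List.nil_append, List.singleton_append,
          List.dropWhile_cons]
        rw [if_pos (by decide)]
        have := rstrip_eq_self (PySem.Chars.join ['\n'] (p :: pt)) hok.2
        rw [PySem.Chars.rstrip] at this
        exact this
    · simp only [ne_eq, hcur, not_false_eq_true, if_pos]
      congr 1
      apply strip_eq_self
      apply okW_join _ _ (by simp)
      intro x hx
      rcases List.mem_append.mp hx with h | h
      · exact hinv.1 x h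
      · simp only [List.mem_singleton] at h; subst h
        refine ⟨?_, okW_join [' '] st.2 hcur hinv.2⟩
        rw [ne_eq, joinSp_ne_nil st.2 hinv.2]; exact hcur
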